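-- pv_equiv track=rewrite | github.com/cwatts2018/bacon | lab.py | actors_with_bacon_number_general
-- ===== SOURCE A (Python) =====
-- def actors_with_bacon_number_general(transformed_data, actor_id, n):
--     """
--     Given transformed_data in the format:
--         ex: {'actors': {parent_actor: {actor_1, actor_2, ...}, parent_actor:
--         {actor_1]}..}, 'movies_and_who_with': {actor: {(film, actor),
--         (film, actor), }}, 'movies': {movie: {actor, actor}}}
--     a actor_id of the person who is "Bacon", and a Bacon number n >= 0,
--     returns a set of all actors IDs with that Bacon number from actor_id.
--     """
--     transformed_data = transformed_data["actors"]
--     if n>len(transformed_data):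
--         return set()
--     if n == 0:
--         return {actor_id}
--     checked_actors = {actor_id}
--     parent_actors = transformed_data[actor_id] #Set of actors with Bacon 1
--     parent_actors = list(parent_actors)
--
--     #Bacon number 1 list
--     parent_actors = {parent for parent in parent_actors if parent != actor_id}
--     while n>1:
--         new_parents = set()
--         for parent in parent_actors: #for all actors of previous Bacon number
--             if parent not in checked_actors:
--                 for child in transformed_data[parent]:
--                     if child not in checked_actors and child not in parent_actors:
--                         new_parents.add(child)
--         checked_actors = checked_actors.union(parent_actors)
--         parent_actors = new_parents
--         n -= 1
--     return set(parent_actors)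
-- ===== SOURCE B (Python) =====
-- def actors_with_bacon_number_general(transformed_data, actor_id, n):
--     """Single-queue BFS with a distance map instead of frontier-set iteration."""
--     graph = transformed_data["actors"]
--     if n > len(graph):
--         return set()
--     if n == 0:
--         return {actor_id}
--     dist = {actor_id: 0}
--     queue = [actor_id]
--     i = 0
--     while i < len(queue):
--         u = queue[i]
--         i += 1
--         if dist[u] < n:
--             for v in graph[u]:
--                 if v not in dist:
--                     dist[v] = dist[u] + 1
--                     queue.append(v)
--     return {v for v, d in dist.items() if d == n}
-- ===== Notes on version B (the rewrite author's own statement) =====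
-- stated objective: idiomatic
-- what changed: A rebuilds a new frontier set each round from the previous frontier (checked/parent_actors set algebra, one pass per Bacon level); B is a textbook single-queue BFS over one distance dict, capped at depth n, returning the keys at distance exactly n.
-- intended difference: For n < 0 (actor_id in the graph with a neighbour other than itself) A's decrement loop never runs and it returns the Bacon-number-1 set, while B returns the empty set, the intended value since no actor has a negative Bacon number (the docstring requires n >= 0). — e.g. on actors_with_bacon_number_general([("actors", [(1, [2]), (2, [1])])], 1, -1): A returns [2], B returns []
-- outside the precondition, e.g. on actors_with_bacon_number_general({'actors': {1: {2}, 2: {3}}}, 1, 2): A returns {3}, B returns {3}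
import Mathlib
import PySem

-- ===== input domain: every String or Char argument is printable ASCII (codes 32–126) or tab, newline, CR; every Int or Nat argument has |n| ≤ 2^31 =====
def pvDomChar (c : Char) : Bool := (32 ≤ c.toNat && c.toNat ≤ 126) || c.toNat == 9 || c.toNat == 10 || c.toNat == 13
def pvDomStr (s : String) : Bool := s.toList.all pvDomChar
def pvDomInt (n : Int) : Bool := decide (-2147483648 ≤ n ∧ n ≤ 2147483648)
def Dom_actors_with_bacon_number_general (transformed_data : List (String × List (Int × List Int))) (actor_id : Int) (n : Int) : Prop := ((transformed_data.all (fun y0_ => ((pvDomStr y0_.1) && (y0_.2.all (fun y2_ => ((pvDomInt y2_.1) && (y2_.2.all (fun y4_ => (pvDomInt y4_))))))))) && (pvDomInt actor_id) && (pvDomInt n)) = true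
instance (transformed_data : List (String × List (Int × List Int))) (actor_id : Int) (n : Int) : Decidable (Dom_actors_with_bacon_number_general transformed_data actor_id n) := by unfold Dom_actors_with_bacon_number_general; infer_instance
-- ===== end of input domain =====

-- B replaces A's frontier-set iteration (rebuild a new frontier set each round) by a single-queue
-- BFS over a distance map, capped at depth n; same cost class, a different algorithmic organisation.

-- ===== PORT A =====
-- inner double loop of A's while-body: for one `parent`, add its unseen children to the set `acc`
-- (A iterates Python sets only to build other sets, so the port iterates the stored lists directly:
-- the resulting set does not depend on the iteration order)
def pvAExpand (adj : PySem.Dict Int (List Int)) (checked parents : PySem.Set Int)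
    (acc : PySem.Set Int) (parent : Int) : PySem.Set Int :=
  if PySem.Set.contains checked parent then acc
  else
    (adj.getD parent []).foldl
      (fun acc2 child =>
        if !(PySem.Set.contains checked child) && !(PySem.Set.contains parents child) then
          PySem.Set.add acc2 child
        else acc2) acc

-- A's `while n > 1` loop: it runs (n-1).toNat times; the Nat counter is only the
-- structural-recursion form of the same Int countdown
def pvALoopGo (adj : PySem.Dict Int (List Int)) : Nat → PySem.Set Int → PySem.Set Int → PySem.Set Int
  | 0, _, parents => parents
  | m + 1, checked, parents =>
    pvALoopGo adj m (PySem.Set.union checked parents)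
      (parents.foldl (pvAExpand adj checked parents) PySem.Set.empty)

def pvALoop (adj : PySem.Dict Int (List Int)) (checked parents : PySem.Set Int) (n : Int) :
    PySem.Set Int :=
  pvALoopGo adj (n - 1).toNat checked parents

def actors_with_bacon_number_general (transformed_data : List (String × List (Int × List Int))) (actor_id : Int) (n : Int) : List Int :=
  let adj : PySem.Dict Int (List Int) :=
    PySem.Dict.ofList ((PySem.Dict.ofList transformed_data).getD "actors" [])
  if (adj.size : Int) < n then []
  else if n = 0 then [actor_id]
  else
    let checked : PySem.Set Int := PySem.Set.ofList [actor_id]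
    let parents : PySem.Set Int :=
      PySem.Set.ofList
        ((PySem.Set.ofList (adj.getD actor_id [])).filter (fun p => !(p == actor_id)))
    PySem.Set.ofList (pvALoop adj checked parents n)

-- ===== PORT B =====
-- pop `u`, push each unseen neighbour with distance dist[u]+1 (Source B's inner `for v in graph[u]`)
def pvBExpand (adj : PySem.Dict Int (List Int)) (u : Int)
    (st : PySem.Dict Int Int × List Int) : PySem.Dict Int Int × List Int :=
  (adj.getD u []).foldl
    (fun st v =>
      if st.1.contains v then st
      else (st.1.insert v (st.1.getD u 0 + 1), st.2 ++ [v])) st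

-- Source B's `while i < len(queue)` loop; `queue` is the not-yet-popped suffix.
-- `fuel` is a totality guard only: every node is enqueued at most once, so
-- 1 + (total length of all neighbour lists) pops always suffice.
def pvBLoop (adj : PySem.Dict Int (List Int)) (n : Int) (fuel : Nat)
    (dist : PySem.Dict Int Int) (queue : List Int) : PySem.Dict Int Int :=
  match fuel, queue with
  | 0, _ => dist
  | _ + 1, [] => dist
  | fuel + 1, u :: rest =>
    if dist.getD u 0 < n then
      let st := pvBExpand adj u (dist, rest)
      pvBLoop adj n fuel st.1 st.2
    else pvBLoop adj n fuel dist rest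

def actors_with_bacon_number_general_alt (transformed_data : List (String × List (Int × List Int))) (actor_id : Int) (n : Int) : List Int :=
  let adj : PySem.Dict Int (List Int) :=
    PySem.Dict.ofList ((PySem.Dict.ofList transformed_data).getD "actors" [])
  if (adj.size : Int) < n then []
  else if n = 0 then [actor_id]
  else
    let dist := pvBLoop adj n (adj.values.flatten.length + 1)
      (PySem.Dict.empty.insert actor_id 0) [actor_id]
    PySem.Set.ofList ((dist.items.filter (fun p => p.2 == n)).map (fun p => p.1))

-- ===== PRECONDITION & SPEC =====
-- Pre_ excludes exactly the KeyError inputs of the Python: a missing "actors" key, a bacon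
-- actor_id absent from the graph when it is looked up, and — for 2 ≤ n ≤ len — graphs that
-- mention a neighbour id with no adjacency entry (there both programs raise whenever such a
-- node is reached within n-1 steps; reachability is not a closed form, so the whole-graph
-- closure is required, which also excludes some inputs where the missing node is never
-- reached and both programs return the same value — see the cited example).
def Pre_actors_with_bacon_number_general (transformed_data : List (String × List (Int × List Int))) (actor_id : Int) (n : Int) : Prop :=
  let outer := PySem.Dict.ofList transformed_data
  let adj : PySem.Dict Int (List Int) := PySem.Dict.ofList (outer.getD "actors" [])
  outer.contains "actors" = true ∧
  ((n ≤ (adj.size : Int) ∧ n ≠ 0) → adj.contains actor_id = true) ∧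
  ((2 ≤ n ∧ n ≤ (adj.size : Int)) → ∀ p ∈ adj.items, ∀ v ∈ p.2, adj.contains v = true)
instance (transformed_data : List (String × List (Int × List Int))) (actor_id : Int) (n : Int) : Decidable (Pre_actors_with_bacon_number_general transformed_data actor_id n) := by unfold Pre_actors_with_bacon_number_general; infer_instance

def pvWitness_actors_with_bacon_number_general : (List (String × List (Int × List Int))) × Int × Int :=
  ([("actors", [(1, [2]), (2, [1])])], 1, 1)

-- last-match association-list lookup = the value the Python dict holds for this key
def pvLookup {κ ν : Type} [DecidableEq κ] (l : List (κ × ν)) (k : κ) : Option ν :=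
  l.foldl (fun acc p => if p.1 = k then some p.2 else acc) none

-- For n < 0 (actor_id in the graph with some neighbour other than itself) A's decrement loop never
-- runs, so A returns the Bacon-number-1 set; B returns the empty set, the intended value since no
-- actor has a negative Bacon number (the docstring requires n >= 0).
def D_actors_with_bacon_number_general (transformed_data : List (String × List (Int × List Int))) (actor_id : Int) (n : Int) : Prop :=
  n < 0 ∧
  ∃ v ∈ (pvLookup ((pvLookup transformed_data "actors").getD []) actor_id).getD [], v ≠ actor_id
instance (transformed_data : List (String × List (Int × List Int))) (actor_id : Int) (n : Int) : Decidable (D_actors_with_bacon_number_general transformed_data actor_id n) := by unfold D_actors_with_bacon_number_general; infer_instance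

def Spec_actors_with_bacon_number_general (transformed_data : List (String × List (Int × List Int))) (actor_id : Int) (n : Int) (out : List Int) : Prop := ¬ D_actors_with_bacon_number_general transformed_data actor_id n → out = actors_with_bacon_number_general_alt transformed_data actor_id n
instance (transformed_data : List (String × List (Int × List Int))) (actor_id : Int) (n : Int) (out : List Int) : Decidable (Spec_actors_with_bacon_number_general transformed_data actor_id n out) := by unfold Spec_actors_with_bacon_number_general; infer_instance

def pvDiffWitness_actors_with_bacon_number_general : (List (String × List (Int × List Int))) × Int × Int :=
  ([("actors", [(1, [2]), (2, [1])])], 1, -1)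
def pvDiffWitnessOut_actors_with_bacon_number_general : (List Int) × (List Int) := ([2], [])

-- ===== CLAIM (what is proved, stated in full; the proofs are below) =====
def Claim_unchanged_actors_with_bacon_number_general : Prop := ∀ (transformed_data : List (String × List (Int × List Int))) (actor_id : Int) (n : Int), Dom_actors_with_bacon_number_general transformed_data actor_id n → Pre_actors_with_bacon_number_general transformed_data actor_id n → Spec_actors_with_bacon_number_general transformed_data actor_id n (actors_with_bacon_number_general transformed_data actor_id n)
def Claim_changed_actors_with_bacon_number_general : Prop := Dom_actors_with_bacon_number_general (pvDiffWitness_actors_with_bacon_number_general.1) (pvDiffWitness_actors_with_bacon_number_general.2.1) (pvDiffWitness_actors_with_bacon_number_general.2.2) ∧ Pre_actors_with_bacon_number_general (pvDiffWitness_actors_with_bacon_number_general.1) (pvDiffWitness_actors_with_bacon_number_general.2.1) (pvDiffWitness_actors_with_bacon_number_general.2.2) ∧ D_actors_with_bacon_number_general (pvDiffWitness_actors_with_bacon_number_general.1) (pvDiffWitness_actors_with_bacon_number_general.2.1) (pvDiffWitness_actors_with_bacon_number_general.2.2) ∧ actors_with_bacon_number_general (pvDiffWitness_actors_with_bacon_number_general.1)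 (pvDiffWitness_actors_with_bacon_number_general.2.1) (pvDiffWitness_actors_with_bacon_number_general.2.2) = pvDiffWitnessOut_actors_with_bacon_number_general.1 ∧ actors_with_bacon_number_general_alt (pvDiffWitness_actors_with_bacon_number_general.1) (pvDiffWitness_actors_with_bacon_number_general.2.1) (pvDiffWitness_actors_with_bacon_number_general.2.2) = pvDiffWitnessOut_actors_with_bacon_number_general.2 ∧ pvDiffWitnessOut_actors_with_bacon_number_general.1 ≠ pvDiffWitnessOut_actors_with_bacon_number_general.2
def Claim_exact_actors_with_bacon_number_general : Prop := ∀ (transformed_data : List (String × List (Int × List Int))) (actor_id : Int) (n : Int), Dom_actors_with_bacon_number_general transformed_data actor_id n → Pre_actors_with_bacon_number_general transformed_data actor_id n → D_actors_with_bacon_number_general transformed_data actor_id n → actors_with_bacon_number_general transformed_data actor_id n ≠ actors_with_bacon_number_general_alt transformed_data actor_id n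

-- ===== LEMMAS AND PROOFS =====

-- ordered "first fresh occurrences" of vs relative to the already-seen list `seen`:
-- the common shape of A's set-building inner loop and B's dict-guarded enqueueing
def pvNew (seen vs : List Int) : List Int :=
  match vs with
  | [] => []
  | v :: vs => if v ∈ seen then pvNew seen vs else v :: pvNew (seen ++ [v]) vs

theorem pvNew_mem (seen vs : List Int) (x : Int) (hx : x ∈ pvNew seen vs) :
    x ∈ vs ∧ x ∉ seen := by
  induction vs generalizing seen with
  | nil => simp [pvNew] at hx
  | cons v vs ih =>
    simp only [pvNew] at hx
    by_cases hv : v ∈ seen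
    · rw [if_pos hv] at hx
      obtain ⟨h1, h2⟩ := ih _ hx; exact ⟨List.mem_cons_of_mem _ h1, h2⟩
    · rw [if_neg hv] at hx
      rcases List.mem_cons.1 hx with rfl | hx'
      · exact ⟨List.mem_cons_self .., hv⟩
      · obtain ⟨h1, h2⟩ := ih _ hx'
        refine ⟨List.mem_cons_of_mem _ h1, fun hs => h2 ?_⟩
        simp [hs]

theorem pvNew_nodup_append (vs : List Int) : ∀ seen : List Int, seen.Nodup →
    (seen ++ pvNew seen vs).Nodup := by
  induction vs with
  | nil => intro seen h; simpa [pvNew]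
  | cons v vs ih =>
    intro seen h
    simp only [pvNew]
    by_cases hv : v ∈ seen
    · rw [if_pos hv]; exact ih seen h
    · rw [if_neg hv]
      have := ih (seen ++ [v])
        (by rw [List.nodup_append]; exact ⟨h, List.nodup_singleton v, fun a ha b hb => by
              rintro rfl; exact hv (List.mem_singleton.1 hb ▸ ha)⟩)
      simpa [List.append_assoc] using this

theorem pvLookup_eq_foldl {κ ν : Type} [BEq κ] [LawfulBEq κ] [DecidableEq κ] (k : κ) :
    ∀ (l : List (κ × ν)) (d : PySem.Dict κ ν),
    l.foldl (fun acc p => if p.1 = k then some p.2 else acc) (d.get? k)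
      = (l.foldl (fun d p => d.insert p.1 p.2) d).get? k := by
  intro l
  induction l with
  | nil => intro d; rfl
  | cons p l ih =>
    intro d
    simp only [List.foldl_cons]
    rw [← ih (d.insert p.1 p.2), PySem.Dict.get?_insert]
    by_cases h : p.1 = k
    · rw [if_pos h, if_pos h.symm]
    · rw [if_neg h, if_neg (fun e => h e.symm)]

theorem pvLookup_eq {κ ν : Type} [BEq κ] [LawfulBEq κ] [DecidableEq κ]
    (l : List (κ × ν)) (k : κ) : pvLookup l k = (PySem.Dict.ofList l).get? k := by
  unfold pvLookup
  have h : (PySem.Dict.ofList l : PySem.Dict κ ν)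
      = l.foldl (fun d p => d.insert p.1 p.2) PySem.Dict.empty := rfl
  rw [h, ← pvLookup_eq_foldl k l PySem.Dict.empty]
  rfl

theorem pvNbrs_eq (td : List (String × List (Int × List Int))) (a : Int) :
    (pvLookup ((pvLookup td "actors").getD []) a).getD []
      = (PySem.Dict.ofList ((PySem.Dict.ofList td).getD "actors" [])).getD a [] := by
  rw [PySem.Dict.getD_eq_get?_getD, ← pvLookup_eq]
  have h : ((pvLookup td "actors").getD [] : List (Int × List Int))
      = (PySem.Dict.ofList td).getD "actors" [] := by
    rw [PySem.Dict.getD_eq_get?_getD, ← pvLookup_eq]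
  rw [h]

theorem pvALoop_base (adj : PySem.Dict Int (List Int)) (checked parents : PySem.Set Int)
    (n : Int) (h : ¬ 1 < n) : pvALoop adj checked parents n = parents := by
  unfold pvALoop
  have h0 : (n - 1).toNat = 0 := by omega
  rw [h0]
  rfl

theorem pvALoop_step (adj : PySem.Dict Int (List Int)) (checked parents : PySem.Set Int)
    (n : Int) (h : 1 < n) :
    pvALoop adj checked parents n
      = pvALoop adj (PySem.Set.union checked parents)
          (parents.foldl (pvAExpand adj checked parents) PySem.Set.empty) (n - 1) := by
  unfold pvALoop
  have h0 : (n - 1).toNat = (n - 1 - 1).toNat + 1 := by omega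
  rw [h0]
  rfl

theorem pvGo_spec (u c : Int) : ∀ (vs : List Int) (dist : PySem.Dict Int Int) (q : List Int),
    dist.get? u = some c → dist.keys.Nodup →
    (vs.foldl (fun st v => if st.1.contains v then st
        else (st.1.insert v (st.1.getD u 0 + 1), st.2 ++ [v])) (dist, q)).1.items
      = dist.items ++ (pvNew dist.keys vs).map (fun v => (v, c + 1)) ∧
    (vs.foldl (fun st v => if st.1.contains v then st
        else (st.1.insert v (st.1.getD u 0 + 1), st.2 ++ [v])) (dist, q)).2
      = q ++ pvNew dist.keys vs := by
  intro vs
  induction vs with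
  | nil => intro dist q h hnd; simp [pvNew]
  | cons v vs ih =>
    intro dist q h hnd
    simp only [List.foldl_cons]
    by_cases hc : dist.contains v = true
    · have hvk : v ∈ dist.keys := (PySem.Dict.contains_iff_mem_keys dist v).1 hc
      simp only [hc, pvNew, hvk, if_pos]
      exact ih dist q h hnd
    · have hcf : dist.contains v = false := by revert hc; cases dist.contains v <;> simp
      have hvk : v ∉ dist.keys := fun hm => by
        rw [(PySem.Dict.contains_iff_mem_keys dist v).2 hm] at hcf; cases hcf
      have hgd : dist.getD u 0 = c := by rw [PySem.Dict.getD_eq_get?_getD, h]; rfl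
      have huk : u ∈ dist.keys :=
        PySem.Dict.mem_keys_of_mem_items _ (PySem.Dict.mem_items_of_get?_eq_some dist h)
      have hne : u ≠ v := fun e => hvk (e ▸ huk)
      have hitems' : (dist.insert v (c + 1)).items = dist.items ++ [(v, c + 1)] := by
        rw [PySem.Dict.items_insert_of_not_contains dist _ hcf]
      have hkeys' : (dist.insert v (c + 1)).keys = dist.keys ++ [v] := by
        show (dist.insert v (c + 1)).items.map (·.1) = _
        rw [hitems']; simp [PySem.Dict.keys]
      have hnd' : (dist.insert v (c + 1)).keys.Nodup := by
        rw [hkeys', List.nodup_append]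
        exact ⟨hnd, List.nodup_singleton v, fun a ha b hb => by
          rintro rfl; exact hvk (List.mem_singleton.1 hb ▸ ha)⟩
      have hq' : (dist.insert v (c + 1)).get? u = some c := by
        rw [PySem.Dict.get?_insert_of_ne dist _ hne]; exact h
      obtain ⟨ih1, ih2⟩ := ih (dist.insert v (c + 1)) (q ++ [v]) hq' hnd'
      simp only [hcf, Bool.false_eq_true, if_false, hgd]
      constructor
      · rw [ih1, hitems', hkeys']
        simp only [pvNew, hvk, List.append_assoc, List.singleton_append]
        simp
      · rw [ih2, hkeys']
        simp only [pvNew, hvk, List.append_assoc, List.singleton_append]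
        simp

theorem pvBExpand_spec (adj : PySem.Dict Int (List Int)) (u c : Int)
    (dist : PySem.Dict Int Int) (q : List Int)
    (h : dist.get? u = some c) (hnd : dist.keys.Nodup) :
    (pvBExpand adj u (dist, q)).1.items
      = dist.items ++ (pvNew dist.keys (adj.getD u [])).map (fun v => (v, c + 1)) ∧
    (pvBExpand adj u (dist, q)).2 = q ++ pvNew dist.keys (adj.getD u []) :=
  pvGo_spec u c (adj.getD u []) dist q h hnd

theorem pvBLoop_nil (adj : PySem.Dict Int (List Int)) (n : Int) (fuel : Nat)
    (dist : PySem.Dict Int Int) : pvBLoop adj n fuel dist [] = dist := by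
  cases fuel <;> rfl

theorem pvBLoop_drain (adj : PySem.Dict Int (List Int)) (n : Int) :
    ∀ (q : List Int) (fuel : Nat) (dist : PySem.Dict Int Int),
    (∀ u ∈ q, ¬ dist.getD u 0 < n) → pvBLoop adj n (q.length + fuel) dist q = dist := by
  intro q
  induction q with
  | nil => intro fuel dist _; exact pvBLoop_nil adj n _ dist
  | cons u q ih =>
    intro fuel dist h
    have hl : (u :: q).length + fuel = (q.length + fuel) + 1 := by simp; omega
    rw [hl]
    show pvBLoop adj n ((q.length + fuel) + 1) dist (u :: q) = dist
    rw [pvBLoop, if_neg (h u (List.mem_cons_self ..))]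
    exact ih fuel dist (fun v hv => h v (List.mem_cons_of_mem _ hv))

theorem pvBLoop_level (adj : PySem.Dict Int (List Int)) (n : Int) (fuel : Nat) :
    ∀ (us : List Int) (dist : PySem.Dict Int Int) (acc : List Int),
    dist.keys.Nodup →
    (∀ u ∈ us, ∃ c : Int, dist.get? u = some c ∧ c < n) →
    pvBLoop adj n (us.length + fuel) dist (us ++ acc)
      = pvBLoop adj n fuel
          (us.foldl (fun st u => pvBExpand adj u st) (dist, acc)).1
          (us.foldl (fun st u => pvBExpand adj u st) (dist, acc)).2 := by
  intro us
  induction us with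
  | nil => intro dist acc _ _; simp
  | cons u us ih =>
    intro dist acc hnd h
    obtain ⟨c, hc, hcn⟩ := h u (List.mem_cons_self ..)
    have hgd : dist.getD u 0 = c := by rw [PySem.Dict.getD_eq_get?_getD, hc]; rfl
    obtain ⟨hi, hq⟩ := pvBExpand_spec adj u c dist (us ++ acc) hc hnd
    obtain ⟨hi', hq'⟩ := pvBExpand_spec adj u c dist acc hc hnd
    set new := pvNew dist.keys (adj.getD u []) with hnew
    have hfst : (pvBExpand adj u (dist, us ++ acc)).1 = (pvBExpand adj u (dist, acc)).1 :=
      PySem.Dict.ext (hi.trans hi'.symm)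
    have hkeys' : (pvBExpand adj u (dist, acc)).1.keys = dist.keys ++ new := by
      show (pvBExpand adj u (dist, acc)).1.items.map (·.1) = _
      rw [hi']; simp [PySem.Dict.keys, Function.comp_def]
    have hnd' : (pvBExpand adj u (dist, acc)).1.keys.Nodup := by
      rw [hkeys']; exact pvNew_nodup_append _ _ hnd
    have hmem : ∀ u' ∈ us, ∃ c' : Int,
        (pvBExpand adj u (dist, acc)).1.get? u' = some c' ∧ c' < n := by
      intro u' hu'
      obtain ⟨c', hc', hcn'⟩ := h u' (List.mem_cons_of_mem _ hu')
      refine ⟨c', ?_, hcn'⟩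
      have : (u', c') ∈ (pvBExpand adj u (dist, acc)).1.items := by
        rw [hi']; exact List.mem_append_left _ (PySem.Dict.mem_items_of_get?_eq_some dist hc')
      exact PySem.Dict.get?_of_mem_items _ this hnd'
    have hlen : (u :: us).length + fuel = (us.length + fuel) + 1 := by simp; omega
    rw [hlen]
    show pvBLoop adj n ((us.length + fuel) + 1) dist (u :: (us ++ acc)) = _
    rw [pvBLoop, if_pos (by rw [hgd]; exact hcn)]
    show pvBLoop adj n (us.length + fuel) (pvBExpand adj u (dist, us ++ acc)).1
        (pvBExpand adj u (dist, us ++ acc)).2 = _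
    rw [hfst, hq, List.append_assoc, ← hq']
    rw [ih _ _ hnd' hmem]
    rfl

theorem pvAExpandGo_eq (checked parents : PySem.Set Int) (C : List Int)
    (hC : ∀ x : Int, PySem.Set.contains checked x = true ↔ x ∈ C) :
    ∀ (vs acc : List Int),
    vs.foldl (fun acc2 child =>
        if !(PySem.Set.contains checked child) && !(PySem.Set.contains parents child) then
          PySem.Set.add acc2 child
        else acc2) acc
      = acc ++ pvNew (C ++ parents ++ acc) vs := by
  intro vs
  induction vs with
  | nil => intro acc; simp [pvNew]
  | cons child vs ih =>
    intro acc
    simp only [List.foldl_cons]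
    by_cases h1 : child ∈ C
    · have : PySem.Set.contains checked child = true := (hC child).2 h1
      rw [this]
      simp only [Bool.not_true, Bool.false_and, Bool.false_eq_true, if_false]
      rw [ih acc, pvNew, if_pos (by simp [h1])]
    · have hcc : PySem.Set.contains checked child = false := by
        revert h1; rw [← hC child]; cases PySem.Set.contains checked child <;> simp
      by_cases h2 : child ∈ parents
      · have : PySem.Set.contains parents child = true := (PySem.Set.contains_iff parents child).2 h2
        rw [hcc, this]
        simp only [Bool.not_true, Bool.and_false, Bool.false_eq_true, if_false]
        rw [ih acc, pvNew, if_pos (by simp [h2])]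
      · have hpc : PySem.Set.contains parents child = false := by
          revert h2; rw [← PySem.Set.contains_iff parents child]
          cases PySem.Set.contains parents child <;> simp
        rw [hcc, hpc]
        simp only [Bool.not_false, Bool.and_self, if_true]
        rw [PySem.Set.add_eq_ite]
        by_cases h3 : child ∈ acc
        · rw [if_pos h3, ih acc, pvNew, if_pos (by simp [h3])]
        · rw [if_neg h3, ih (acc ++ [child]), pvNew,
            if_neg (by simp [h1, h2, h3]), List.append_assoc]
          simp [List.append_assoc]

theorem pvAExpand_eq (adj : PySem.Dict Int (List Int)) (checked parents : PySem.Set Int)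
    (C : List Int) (hC : ∀ x : Int, PySem.Set.contains checked x = true ↔ x ∈ C)
    (acc : PySem.Set Int) (u : Int) (hu : u ∉ C) :
    pvAExpand adj checked parents acc u = acc ++ pvNew (C ++ parents ++ acc) (adj.getD u []) := by
  unfold pvAExpand
  rw [if_neg (fun h => hu ((hC u).1 h))]
  exact pvAExpandGo_eq checked parents C hC (adj.getD u []) acc

theorem pvNew_eq_filter : ∀ (vs seen : List Int),
    pvNew seen vs = (PySem.Set.ofList vs).filter (fun v => !(decide (v ∈ seen))) := by
  intro vs
  induction vs with
  | nil => intro seen; rfl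
  | cons v vs ih =>
    intro seen
    rw [PySem.Set.ofList_cons]
    have hdisc : (PySem.Set.ofList vs).discard v
        = (PySem.Set.ofList vs).filter (fun y => !(y == v)) := rfl
    by_cases hv : v ∈ seen
    · rw [pvNew, if_pos hv, ih seen, List.filter_cons,
        if_neg (by simp [hv]), hdisc, List.filter_filter]
      exact (List.filter_congr (fun a _ => by
        by_cases h1 : a ∈ seen
        · simp [h1]
        · have h2 : a ≠ v := fun e => h1 (by rw [e]; exact hv)
          simp [h1, h2])).symm
    · rw [pvNew, if_neg hv, ih (seen ++ [v]), List.filter_cons,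
        if_pos (by simp [hv]), hdisc, List.filter_filter]
      refine congrArg _ (List.filter_congr (fun a _ => by
        by_cases h1 : a ∈ seen <;> by_cases h2 : a = v <;> simp [h1, h2]))

theorem pvGetD_subset_flatten (adj : PySem.Dict Int (List Int)) (u x : Int)
    (hx : x ∈ adj.getD u []) : x ∈ adj.values.flatten := by
  rw [PySem.Dict.getD_eq_get?_getD] at hx
  cases hget : adj.get? u with
  | none => rw [hget] at hx; simp at hx
  | some l =>
    rw [hget] at hx
    refine List.mem_flatten.2 ⟨l, ?_, hx⟩
    exact List.mem_map.2 ⟨(u, l), PySem.Dict.mem_items_of_get?_eq_some adj hget, rfl⟩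

theorem pvLevel_zip (adj : PySem.Dict Int (List Int)) (checked : PySem.Set Int)
    (pairs : List (Int × Int)) (LkFull : List Int) (k : Int)
    (hchk : ∀ x : Int, PySem.Set.contains checked x = true ↔ x ∈ pairs.map (fun p => p.1)) :
    ∀ (us : List Int) (dist : PySem.Dict Int Int) (acc : List Int),
    (∀ u ∈ us, u ∈ LkFull) →
    dist.items = pairs ++ LkFull.map (fun u => (u, k)) ++ acc.map (fun v => (v, k + 1)) →
    dist.keys.Nodup →
    (us.foldl (fun st u => pvBExpand adj u st) (dist, acc)).2
        = us.foldl (pvAExpand adj checked LkFull) acc ∧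
    (us.foldl (fun st u => pvBExpand adj u st) (dist, acc)).1.items
        = pairs ++ LkFull.map (fun u => (u, k))
            ++ (us.foldl (pvAExpand adj checked LkFull) acc).map (fun v => (v, k + 1)) ∧
    (us.foldl (fun st u => pvBExpand adj u st) (dist, acc)).1.keys.Nodup ∧
    (∀ x ∈ us.foldl (pvAExpand adj checked LkFull) acc, x ∈ acc ∨ x ∈ adj.values.flatten) := by
  intro us
  induction us with
  | nil =>
    intro dist acc _ hitems hnd
    exact ⟨rfl, hitems, hnd, fun x hx => Or.inl hx⟩
  | cons u us ih =>
    intro dist acc hus hitems hnd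
    have hu : u ∈ LkFull := hus u (List.mem_cons_self ..)
    have hkeys : dist.keys = pairs.map (fun p => p.1) ++ LkFull ++ acc := by
      show dist.items.map (·.1) = _
      rw [hitems]; simp [Function.comp_def]
    have hget : dist.get? u = some k := by
      refine PySem.Dict.get?_of_mem_items dist ?_ hnd
      rw [hitems]
      exact List.mem_append_left _ (List.mem_append_right _ (List.mem_map.2 ⟨u, hu, rfl⟩))
    have hndk := hnd
    rw [hkeys] at hndk
    have hnotC : u ∉ pairs.map (fun p => p.1) := by
      have h1 : (pairs.map (fun p => p.1) ++ LkFull).Nodup := (List.nodup_append.1 hndk).1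
      intro hc
      have hd := (List.nodup_append.1 h1).2.2
      exact hd u hc u hu rfl
    obtain ⟨hbi, hbq⟩ := pvBExpand_spec adj u k dist acc hget hnd
    set new := pvNew dist.keys (adj.getD u []) with hnewdef
    have hA : pvAExpand adj checked LkFull acc u
        = acc ++ pvNew (pairs.map (fun p => p.1) ++ LkFull ++ acc) (adj.getD u []) :=
      pvAExpand_eq adj checked LkFull (pairs.map (fun p => p.1)) hchk acc u hnotC
    rw [← hkeys] at hA
    have hitems' : (pvBExpand adj u (dist, acc)).1.items
        = pairs ++ LkFull.map (fun u => (u, k)) ++ (acc ++ new).map (fun v => (v, k + 1)) := by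
      rw [hbi, hitems]; simp [List.append_assoc]
    have hkeys' : (pvBExpand adj u (dist, acc)).1.keys = dist.keys ++ new := by
      show (pvBExpand adj u (dist, acc)).1.items.map (·.1) = _
      rw [hbi]; simp [PySem.Dict.keys, Function.comp_def]
    have hnd' : (pvBExpand adj u (dist, acc)).1.keys.Nodup := by
      rw [hkeys']; exact pvNew_nodup_append _ _ hnd
    have ihr := ih (pvBExpand adj u (dist, acc)).1 (acc ++ new)
      (fun v hv => hus v (List.mem_cons_of_mem _ hv)) hitems' hnd'
    obtain ⟨i1, i2, i3, i4⟩ := ihr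
    have hfoldA : (u :: us).foldl (pvAExpand adj checked LkFull) acc
        = us.foldl (pvAExpand adj checked LkFull) (acc ++ new) := by
      rw [List.foldl_cons, hA]
    have hfoldB : ((u :: us).foldl (fun st u => pvBExpand adj u st) (dist, acc))
        = us.foldl (fun st u => pvBExpand adj u st) (pvBExpand adj u (dist, acc)) := rfl
    refine ⟨?_, ?_, ?_, ?_⟩
    · rw [hfoldB, hfoldA]
      have : pvBExpand adj u (dist, acc)
          = ((pvBExpand adj u (dist, acc)).1, acc ++ new) := by
        rw [← hbq]
      rw [this] at i1 ⊢
      exact i1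
    · rw [hfoldB, hfoldA]
      have : pvBExpand adj u (dist, acc)
          = ((pvBExpand adj u (dist, acc)).1, acc ++ new) := by rw [← hbq]
      rw [this] at i2 ⊢
      exact i2
    · rw [hfoldB]
      have : pvBExpand adj u (dist, acc)
          = ((pvBExpand adj u (dist, acc)).1, acc ++ new) := by rw [← hbq]
      rw [this] at i3 ⊢
      exact i3
    · rw [hfoldA]
      intro x hx
      rcases i4 x hx with hx' | hx'
      · rcases List.mem_append.1 hx' with h | h
        · exact Or.inl h
        · refine Or.inr (pvGetD_subset_flatten adj u x ?_)
          exact (pvNew_mem _ _ x h).1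
      · exact Or.inr hx'

theorem pvNodup_subset_length {l big : List Int} (hnd : l.Nodup) (hsub : l ⊆ big) :
    l.length ≤ big.length :=
  (List.subperm_of_subset hnd hsub).length_le

theorem pvMain (adj : PySem.Dict Int (List Int)) (n actor : Int) :
    ∀ (j : Nat) (k c : Int) (pairs : List (Int × Int)) (Lk : List Int)
      (checked : PySem.Set Int) (dist : PySem.Dict Int Int),
    c = (j : Int) + 1 →
    k + c = n + 1 →
    dist.items = pairs ++ Lk.map (fun u => (u, k)) →
    dist.keys.Nodup →
    (∀ x : Int, PySem.Set.contains checked x = true ↔ x ∈ pairs.map (fun p => p.1)) →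
    checked.Nodup →
    (∀ p ∈ pairs, p.2 < k) →
    (∀ x ∈ dist.keys, x = actor ∨ x ∈ adj.values.flatten) →
    ∃ F : Nat, F + dist.size ≤ Lk.length + (adj.values.flatten.length + 1) ∧
      ∀ fuel : Nat, pvALoop adj checked Lk c
        = ((pvBLoop adj n (F + fuel) dist Lk).items.filter
            (fun p => p.2 == n)).map (fun p => p.1) := by
  intro j
  induction j with
  | zero =>
    intro k c pairs Lk checked dist hcj hkc hitems hnd hchk hcnd hlt hsub
    have hkn : k = n := by omega
    have hc1 : ¬ (1 : Int) < c := by omega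
    have hget : ∀ u ∈ Lk, dist.getD u 0 = n := by
      intro u hu
      have : dist.get? u = some k := by
        refine PySem.Dict.get?_of_mem_items dist ?_ hnd
        rw [hitems]
        exact List.mem_append_right _ (List.mem_map.2 ⟨u, hu, rfl⟩)
      rw [PySem.Dict.getD_eq_get?_getD, this, hkn]; rfl
    refine ⟨Lk.length, ?_, ?_⟩
    · have hsz : dist.size ≤ adj.values.flatten.length + 1 := by
        have h1 : dist.keys ⊆ actor :: adj.values.flatten := by
          intro x hx
          rcases hsub x hx with h | h
          · exact h ▸ List.mem_cons_self ..
          · exact List.mem_cons_of_mem _ h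
        have h2 := pvNodup_subset_length hnd h1
        simpa [PySem.Dict.keys] using h2
      omega
    · intro fuel
      rw [pvBLoop_drain adj n Lk fuel dist (fun u hu => by rw [hget u hu]; omega)]
      rw [pvALoop_base adj checked Lk c hc1, hitems, List.filter_append]
      have h1 : pairs.filter (fun p => p.2 == n) = [] := by
        refine List.filter_eq_nil_iff.2 (fun p hp => ?_)
        have := hlt p hp
        simp only [beq_iff_eq]
        omega
      have h2 : (Lk.map (fun u => (u, k))).filter (fun p => p.2 == n) = Lk.map (fun u => (u, k)) := by
        refine List.filter_eq_self.2 (fun p hp => ?_)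
        obtain ⟨u, _, rfl⟩ := List.mem_map.1 hp
        simp [hkn]
      rw [h1, h2]
      simp [Function.comp_def]
  | succ j ih =>
    intro k c pairs Lk checked dist hcj hkc hitems hnd hchk hcnd hlt hsub
    have hc1 : (1 : Int) < c := by push_cast at hcj; omega
    have hkn : k < n := by omega
    have hitems0 : dist.items
        = pairs ++ Lk.map (fun u => (u, k)) ++ ([] : List Int).map (fun v => (v, k + 1)) := by
      simpa using hitems
    obtain ⟨hz2, hzitems, hznd, hzmem⟩ :=
      pvLevel_zip adj checked pairs Lk k hchk Lk dist [] (fun u hu => hu) hitems0 hnd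
    set stB := Lk.foldl (fun st u => pvBExpand adj u st) (dist, ([] : List Int)) with hstB
    set L' := Lk.foldl (pvAExpand adj checked Lk) ([] : List Int) with hL'
    have hgetk : ∀ u ∈ Lk, ∃ c1 : Int, dist.get? u = some c1 ∧ c1 < n := by
      intro u hu
      refine ⟨k, ?_, hkn⟩
      refine PySem.Dict.get?_of_mem_items dist ?_ hnd
      rw [hitems]
      exact List.mem_append_right _ (List.mem_map.2 ⟨u, hu, rfl⟩)
    have hkeys' : stB.1.keys = pairs.map (fun p => p.1) ++ Lk ++ L' := by
      show stB.1.items.map (·.1) = _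
      rw [hzitems]; simp [Function.comp_def]
    have ihr := ih (k + 1) (c - 1) (pairs ++ Lk.map (fun u => (u, k))) L'
      (PySem.Set.union checked Lk) stB.1
      (by push_cast at hcj; omega) (by omega)
      (by rw [hzitems])
      hznd
      (by
        intro x
        rw [PySem.Set.contains_iff]
        rw [PySem.Set.mem_union checked Lk x]
        constructor
        · rintro (h | h)
          · simp only [List.map_append]
            exact List.mem_append_left _ ((hchk x).1 ((PySem.Set.contains_iff checked x).2 h))
          · simp only [List.map_append]
            refine List.mem_append_right _ ?_
            simp only [List.map_map]
            simpa [Function.comp_def] using h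
        · intro h
          simp only [List.map_append, List.mem_append, List.map_map] at h
          rcases h with h | h
          · exact Or.inl ((PySem.Set.contains_iff checked x).1 ((hchk x).2 h))
          · refine Or.inr ?_
            simpa [Function.comp_def] using h)
      (PySem.Set.nodup_union checked Lk hcnd)
      (by
        intro p hp
        rcases List.mem_append.1 hp with h | h
        · have := hlt p h; omega
        · obtain ⟨u, _, rfl⟩ := List.mem_map.1 h
          omega)
      (by
        intro x hx
        rw [hkeys'] at hx
        rcases List.mem_append.1 hx with h | h
        · refine hsub x ?_
          show x ∈ dist.items.map (·.1)
          rw [hitems]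
          simpa [Function.comp_def] using h
        · rcases hzmem x h with h' | h'
          · cases h'
          · exact Or.inr h')
    obtain ⟨F', hb', heq'⟩ := ihr
    refine ⟨Lk.length + F', ?_, ?_⟩
    · have hsz : dist.size = pairs.length + Lk.length := by
        show dist.items.length = _
        rw [hitems]; simp
      have hsz' : stB.1.size = pairs.length + Lk.length + L'.length := by
        show stB.1.items.length = _
        rw [hzitems]; simp; omega
      omega
    · intro fuel
      rw [pvALoop_step adj checked Lk c hc1]
      have hLk : Lk ++ ([] : List Int) = Lk := by simp
      have hlev := pvBLoop_level adj n (F' + fuel) Lk dist [] hnd hgetk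
      rw [hLk] at hlev
      have harr : Lk.length + F' + fuel = Lk.length + (F' + fuel) := by omega
      rw [harr, hlev, hz2]
      have := heq' fuel
      show pvALoop adj (PySem.Set.union checked Lk)
          (Lk.foldl (pvAExpand adj checked Lk) PySem.Set.empty) (c - 1) = _
      have hemp : (PySem.Set.empty : PySem.Set Int) = ([] : List Int) := rfl
      rw [hemp, ← hL', this]

theorem pvDist0_items (a : Int) : (PySem.Dict.empty.insert a (0 : Int)).items = [(a, 0)] := rfl

theorem pvDist0_nodup (a : Int) : (PySem.Dict.empty.insert a (0 : Int)).keys.Nodup := by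
  show ((PySem.Dict.empty.insert a (0 : Int)).items.map (·.1)).Nodup
  rw [pvDist0_items]
  exact List.nodup_singleton a

theorem pvTopMain (adj : PySem.Dict Int (List Int)) (a n : Int) (hn : 1 ≤ n) :
    PySem.Set.ofList (pvALoop adj (PySem.Set.ofList [a])
      (PySem.Set.ofList ((PySem.Set.ofList (adj.getD a [])).filter (fun p => !(p == a)))) n)
    = PySem.Set.ofList (((pvBLoop adj n (adj.values.flatten.length + 1)
        (PySem.Dict.empty.insert a 0) [a]).items.filter
          (fun p => p.2 == n)).map (fun p => p.1)) := by
  set dist0 : PySem.Dict Int Int := PySem.Dict.empty.insert a 0 with hdist0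
  have hget0 : dist0.get? a = some 0 := PySem.Dict.get?_insert_self _ _ _
  have hnd0 : dist0.keys.Nodup := pvDist0_nodup a
  have hkeys0 : dist0.keys = [a] := by
    show dist0.items.map (·.1) = _
    rw [pvDist0_items]; rfl
  obtain ⟨hbi, hbq⟩ := pvBExpand_spec adj a 0 dist0 [] hget0 hnd0
  set L1 := pvNew dist0.keys (adj.getD a []) with hL1
  have hparents : PySem.Set.ofList
      ((PySem.Set.ofList (adj.getD a [])).filter (fun p => !(p == a))) = L1 := by
    rw [hL1, hkeys0, pvNew_eq_filter]
    have hcongr : (PySem.Set.ofList (adj.getD a [])).filter (fun p => !(p == a))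
        = (PySem.Set.ofList (adj.getD a [])).filter (fun v => !(decide (v ∈ [a]))) :=
      List.filter_congr (fun x _ => by by_cases h : x = a <;> simp [h])
    rw [hcongr]
    exact PySem.Set.ofList_eq_self_of_nodup _
      ((PySem.Set.nodup_ofList (adj.getD a [])).filter _)
  have hstep : pvBLoop adj n (adj.values.flatten.length + 1) dist0 [a]
      = pvBLoop adj n adj.values.flatten.length
          (pvBExpand adj a (dist0, [])).1 (pvBExpand adj a (dist0, [])).2 := by
    rw [pvBLoop]
    rw [if_pos (by rw [PySem.Dict.getD_eq_get?_getD, hget0]; show (0 : Int) < n; omega)]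
  have hkeys1 : (pvBExpand adj a (dist0, [])).1.keys = a :: L1 := by
    show (pvBExpand adj a (dist0, [])).1.items.map (·.1) = _
    rw [hbi, pvDist0_items]; simp [Function.comp_def]
  obtain ⟨F, hb, heq⟩ := pvMain adj n a (n - 1).toNat 1 n [(a, 0)] L1
    (PySem.Set.ofList [a]) (pvBExpand adj a (dist0, [])).1
    (by rw [Int.toNat_of_nonneg (by omega)]; omega) (by omega)
    (by rw [hbi, pvDist0_items]; simp)
    (by rw [hkeys1]
        have hL1' : L1 = pvNew [a] (adj.getD a []) := by rw [hL1, hkeys0]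
        have := pvNew_nodup_append (adj.getD a []) [a] (List.nodup_singleton a)
        rw [← hL1'] at this
        simpa using this)
    (by intro x; rw [PySem.Set.contains_iff]; simp [PySem.Set.ofList])
    (by simp [PySem.Set.ofList])
    (by intro p hp; simp at hp; subst hp; norm_num)
    (by
      intro x hx
      rw [hkeys1] at hx
      rcases List.mem_cons.1 hx with rfl | hx'
      · exact Or.inl rfl
      · exact Or.inr (pvGetD_subset_flatten adj a x
          (pvNew_mem _ _ x (by rw [hL1, hkeys0] at hx'; exact hx')).1))
  have hsize : (pvBExpand adj a (dist0, [])).1.size = 1 + L1.length := by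
    show (pvBExpand adj a (dist0, [])).1.items.length = _
    rw [hbi, pvDist0_items]; simp; omega
  have hF : F ≤ adj.values.flatten.length := by omega
  have hfuel : F + (adj.values.flatten.length - F) = adj.values.flatten.length := by omega
  rw [hparents, hstep, hbq, List.nil_append]
  have := heq (adj.values.flatten.length - F)
  rw [hfuel] at this
  rw [this]

theorem pvBNeg (adj : PySem.Dict Int (List Int)) (a n : Int) (hn : n < 0) :
    PySem.Set.ofList (((pvBLoop adj n (adj.values.flatten.length + 1)
        (PySem.Dict.empty.insert a 0) [a]).items.filter
          (fun p => p.2 == n)).map (fun p => p.1)) = [] := by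
  have hstep : pvBLoop adj n (adj.values.flatten.length + 1)
      (PySem.Dict.empty.insert a 0) [a]
      = pvBLoop adj n adj.values.flatten.length (PySem.Dict.empty.insert a 0) [] := by
    rw [pvBLoop]
    rw [if_neg ?hcond]
    case hcond =>
      rw [PySem.Dict.getD_eq_get?_getD, PySem.Dict.get?_insert_self]
      show ¬ (0 : Int) < n
      omega
  rw [hstep, pvBLoop_nil, pvDist0_items]
  have hc : (((a, (0 : Int)) : Int × Int).2 == n) = false := by
    simp only [beq_eq_false_iff_ne, ne_eq]
    omega
  simp only [List.filter_cons, hc, Bool.false_eq_true, if_false]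
  rfl

-- ===== VERDICT (by name: the statements are the Claim_ definitions above) =====
theorem actors_with_bacon_number_general_spec : Claim_unchanged_actors_with_bacon_number_general := by
  intro td a n hdom hpre hD
  simp only [actors_with_bacon_number_general, actors_with_bacon_number_general_alt]
  split_ifs with h1 h2
  · rfl
  · rfl
  · by_cases hn : 1 ≤ n
    · exact pvTopMain _ a n hn
    · have hneg : n < 0 := by omega
      set adj := PySem.Dict.ofList ((PySem.Dict.ofList td).getD "actors" []) with hadj
      have hall : ∀ v ∈ adj.getD a [], v = a := by
        intro v hv
        by_contra hne
        refine hD ⟨hneg, v, ?_, hne⟩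
        rw [pvNbrs_eq td a, ← hadj]
        exact hv
      have hfilter : (PySem.Set.ofList (adj.getD a [])).filter (fun p => !(p == a)) = [] := by
        refine List.filter_eq_nil_iff.2 (fun v hv => ?_)
        have := hall v ((PySem.Set.mem_ofList _ v).1 hv)
        simp [this]
      rw [hfilter]
      rw [pvALoop_base adj _ _ n (by omega)]
      rw [pvBNeg adj a n hneg]
      rfl

theorem actors_with_bacon_number_general_changed : Claim_changed_actors_with_bacon_number_general := by
  unfold Claim_changed_actors_with_bacon_number_general
  decide

theorem actors_with_bacon_number_general_tight : Claim_exact_actors_with_bacon_number_general := by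
  intro td a n hdom hpre hD
  simp only [D_actors_with_bacon_number_general] at hD
  obtain ⟨hneg, v, hv, hva⟩ := hD
  rw [pvNbrs_eq td a] at hv
  simp only [actors_with_bacon_number_general, actors_with_bacon_number_general_alt]
  split_ifs with h1 h2
  · exfalso
    have h0 : (0 : Int) ≤ ((PySem.Dict.ofList ((PySem.Dict.ofList td).getD "actors" [])).size : Int) :=
      Int.natCast_nonneg _
    omega
  · exfalso; omega
  · set adj := PySem.Dict.ofList ((PySem.Dict.ofList td).getD "actors" []) with hadj
    rw [pvALoop_base adj _ _ n (by omega), pvBNeg adj a n hneg]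
    have hvp : v ∈ PySem.Set.ofList
        ((PySem.Set.ofList (adj.getD a [])).filter (fun p => !(p == a))) := by
      refine (PySem.Set.mem_ofList _ v).2 ?_
      refine List.mem_filter.2 ⟨(PySem.Set.mem_ofList _ v).2 hv, by simp [hva]⟩
    intro heq
    have hvp2 : v ∈ PySem.Set.ofList (PySem.Set.ofList
        ((PySem.Set.ofList (adj.getD a [])).filter (fun p => !(p == a)))) :=
      (PySem.Set.mem_ofList _ v).2 hvp
    rw [heq] at hvp2
    cases hvp2
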